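-- pv_equiv track=rewrite | github.com/nicolemhfarley/short-challenges | rev_string_maintain_spaces.py | solve
-- ===== SOURCE A (Python) =====
-- def solve(s):
--     s_list = list(s)
--     rev = s[::-1]
--     rev_s = rev.replace(" ", "")
--     rev_list = list(rev_s)
--     new_list = []
--
--     i = 0
--     j = 0
--     while i < len(s_list):
--         if s_list[i] != ' ':
--             new_list.append(rev_list[j])
--             i += 1
--             j += 1
--         elif s_list[i] == ' ':
--             new_list.append(' ')
--             i += 1
--
--     answer = ''.join(new_list)
--
--     return str(answer)
-- ===== SOURCE B (Python) =====
-- def solve(s):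
--     chars = list(s)
--     left, right = 0, len(chars) - 1
--     while left < right:
--         if chars[left] == ' ':
--             left += 1
--         elif chars[right] == ' ':
--             right -= 1
--         else:
--             chars[left], chars[right] = chars[right], chars[left]
--             left += 1
--             right -= 1
--     return ''.join(chars)
-- ===== Notes on version B (the rewrite author's own statement) =====
-- stated objective: faster
-- what changed: Replaces A's build-reversed-copy / strip-spaces / reassemble pipeline by a single in-place two-pointer loop that converges from both ends, skipping spaces and swapping non-space characters, allocating no intermediate reversed/stripped copies.
import Mathlib
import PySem

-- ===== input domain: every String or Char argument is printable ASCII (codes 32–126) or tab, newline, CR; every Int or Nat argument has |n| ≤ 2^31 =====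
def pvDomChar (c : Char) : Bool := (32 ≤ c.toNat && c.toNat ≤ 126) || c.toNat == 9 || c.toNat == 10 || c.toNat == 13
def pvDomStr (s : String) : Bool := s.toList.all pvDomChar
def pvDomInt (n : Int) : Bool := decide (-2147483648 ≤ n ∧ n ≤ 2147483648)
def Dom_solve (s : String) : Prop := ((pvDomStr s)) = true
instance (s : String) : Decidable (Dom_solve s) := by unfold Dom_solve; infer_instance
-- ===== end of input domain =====

-- B replaces A's build-reversed-copy / strip-spaces / reassemble pipeline by an in-place
-- two-pointer loop converging from both ends, with no intermediate copies (measured faster).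


-- ===== PORT A =====
-- the while loop over i (position in s_list) and j (position in rev_list): i ↔ the
-- consumed prefix of s_list, j ↔ the consumed prefix of rev_list (j only moves forward,
-- so 'rev_list[j]' is 'headD' of the unconsumed part; it is never out of range)
def solveA_go : List Char → List Char → List Char → List Char
  | [], _, new_list => new_list
  | c :: cs, rl, new_list =>
    if c ≠ ' ' then solveA_go cs rl.tail (new_list ++ [rl.headD ' '])
    else solveA_go cs rl (new_list ++ [' '])

def solve (s : String) : String :=
  let s_list := s.toList
  let rev := (PySem.Str.slice? s none none (-1)).getD ""   -- s[::-1] (slice? is never none for step -1)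
  let rev_s := PySem.Str.replace rev " " ""
  let rev_list := rev_s.toList
  let new_list := solveA_go s_list rev_list []
  String.ofList new_list    -- ''.join over single characters, then str() is the identity

-- ===== PORT B =====
-- while left < right: skip spaces from either end, else swap and move both inward
def swapLoop (t : List Char) (l r : Nat) : List Char :=
  if _h : l < r then
    if t.getD l ' ' = ' ' then swapLoop t (l + 1) r
    else if t.getD r ' ' = ' ' then swapLoop t l (r - 1)
    else swapLoop ((t.set l (t.getD r ' ')).set r (t.getD l ' ')) (l + 1) (r - 1)
  else t
termination_by r - l
decreasing_by all_goals omega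

def solve_alt (s : String) : String :=
  let chars := s.toList
  String.ofList (swapLoop chars 0 (chars.length - 1))   -- ''.join(chars)

-- ===== PRECONDITION & SPEC =====
def Spec_solve (s : String) (out : String) : Prop := out = solve_alt s
instance (s : String) (out : String) : Decidable (Spec_solve s out) := by unfold Spec_solve; infer_instance

-- ===== CLAIM (what is proved, stated in full; the proofs are below) =====
def Claim_equal_solve : Prop := ∀ (s : String), Dom_solve s → Spec_solve s (solve s)

-- ===== LEMMAS AND PROOFS =====

-- fill l q: spaces of l stay, non-space positions take q's elements left to right
def fill : List Char → List Char → List Char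
  | [], _ => []
  | c :: cs, q => if c = ' ' then ' ' :: fill cs q else q.headD ' ' :: fill cs q.tail

def nonsp (c : Char) : Bool := c != ' '

-- deque-style recursion mirroring the two-pointer loop on the active segment
def gd : List Char → List Char
  | [] => []
  | a :: rest =>
    if hr : rest = [] then [a]
    else if a = ' ' then ' ' :: gd rest
    else if rest.getLast hr = ' ' then gd (a :: rest.dropLast) ++ [' ']
    else rest.getLast hr :: gd rest.dropLast ++ [a]
termination_by u => u.length
decreasing_by
  all_goals simp [List.length_dropLast]
  all_goals (have := List.length_pos_of_ne_nil hr; omega)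

lemma solveA_go_eq_fill (cs : List Char) : ∀ rl acc, solveA_go cs rl acc = acc ++ fill cs rl := by
  induction cs with
  | nil => intro rl acc; simp [solveA_go, fill]
  | cons c cs ih => intro rl acc; by_cases hc : c = ' ' <;> simp [solveA_go, fill, hc, ih]

lemma replace_space_empty (cs : List Char) :
    PySem.Chars.replace cs [' '] [] = cs.filter nonsp := by
  have go_eq : ∀ fuel (l acc : List Char), l.length ≤ fuel →
      PySem.Chars.replace.go [' '] [] fuel l acc = acc.reverse ++ l.filter nonsp := by
    intro fuel
    induction fuel with
    | zero =>
      intro l acc h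
      have : l = [] := List.eq_nil_of_length_eq_zero (Nat.le_zero.mp h)
      subst this; simp [PySem.Chars.replace.go]
    | succ fuel ih =>
      intro l acc h
      cases l with
      | nil => simp [PySem.Chars.replace.go]
      | cons c t =>
        by_cases hc : c = ' '
        · subst hc
          simp [PySem.Chars.replace.go, List.isPrefixOf, nonsp, ih t _ (by simpa using h)]
        · simp [PySem.Chars.replace.go, List.isPrefixOf, Ne.symm hc,
            ih t _ (by simpa using h)]
          rw [List.filter_cons_of_pos (by simp [nonsp, hc])]
  simp [PySem.Chars.replace, go_eq cs.length cs [] le_rfl]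

lemma fill_append (xs ys q : List Char) :
    fill (xs ++ ys) q = fill xs q ++ fill ys (q.drop (xs.countP nonsp)) := by
  induction xs generalizing q with
  | nil => simp [fill]
  | cons c cs ih =>
    by_cases hc : c = ' '
    · simp [fill, hc, ih, nonsp]
    · simp [fill, hc, ih, nonsp]

lemma fill_prefix (xs : List Char) : ∀ q r, xs.countP nonsp ≤ q.length →
    fill xs (q ++ r) = fill xs q := by
  induction xs with
  | nil => intro q r h; simp [fill]
  | cons c cs ih =>
    intro q r h
    by_cases hc : c = ' '
    · simp only [fill, if_pos hc]
      rw [ih q r (by simpa [List.countP_cons, nonsp, hc] using h)]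
    · cases q with
      | nil => simp [nonsp, hc] at h
      | cons d q' =>
        simp only [fill, if_neg hc, List.cons_append, List.headD_cons, List.tail_cons]
        rw [ih q' r (by simpa [List.countP_cons, nonsp, hc] using h)]

lemma fill_singleton_space (q : List Char) : fill [' '] q = [' '] := by simp [fill]

lemma countP_eq_len_filter (xs : List Char) : xs.countP nonsp = (xs.filter nonsp).length :=
  List.countP_eq_length_filter ..

lemma gd_eq_fill_aux : ∀ n (u : List Char), u.length ≤ n →
    gd u = fill u ((u.filter nonsp).reverse) := by
  intro n
  induction n with
  | zero =>
    intro u h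
    have : u = [] := List.eq_nil_of_length_eq_zero (Nat.le_zero.mp h)
    subst this; simp [gd, fill]
  | succ n ih =>
    intro u h
    cases u with
    | nil => simp [gd, fill]
    | cons a rest =>
      by_cases hr : rest = []
      · subst hr
        by_cases ha : a = ' ' <;> simp [gd, fill, nonsp, ha]
      · have hrest : rest.dropLast ++ [rest.getLast hr] = rest := List.dropLast_append_getLast hr
        set b := rest.getLast hr with hb
        set mid := rest.dropLast with hmid
        have hlen : rest.length ≤ n := by simpa using h
        have hlenmid : mid.length + 1 = rest.length := by
          rw [← hrest]; simp
        by_cases ha : a = ' '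
        · subst ha
          rw [show gd (' ' :: rest) = ' ' :: gd rest by rw [gd.eq_def]; simp [hr]]
          rw [ih rest hlen]
          simp [fill, nonsp]
        · by_cases hsp : b = ' '
          · rw [show gd (a :: rest) = gd (a :: mid) ++ [' '] by
              rw [gd.eq_def]; simp [hr, ha, ← hb, ← hmid, hsp]]
            rw [ih (a :: mid) (by simp; omega)]
            conv_rhs => rw [← hrest, hsp, show a :: (mid ++ [' ']) = (a :: mid) ++ [' '] from rfl]
            rw [show ((a :: mid) ++ [' ']).filter nonsp = (a :: mid).filter nonsp by
              have hf1 : List.filter nonsp [' '] = [] := rfl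
              simp [List.filter_cons, List.filter_append, hf1]]
            rw [fill_append, fill_singleton_space]
          · rw [show gd (a :: rest) = b :: gd mid ++ [a] by
              rw [gd.eq_def]; simp [hr, ← hb, ← hmid, ha, hsp]]
            rw [ih mid (by omega)]
            conv_rhs => rw [← hrest]
            have hfa : (a :: (mid ++ [b])).filter nonsp = a :: (mid.filter nonsp ++ [b]) := by
              rw [List.filter_cons_of_pos (by simp [nonsp, ha]), List.filter_append,
                List.filter_cons_of_pos (by simp [nonsp, hsp])]
              simp
            rw [hfa]
            rw [show fill (a :: (mid ++ [b])) ((a :: (mid.filter nonsp ++ [b])).reverse)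
                = b :: fill (mid ++ [b]) ((mid.filter nonsp).reverse ++ [a]) by
              simp [fill, ha]]
            rw [fill_append]
            rw [fill_prefix mid _ [a] (by rw [countP_eq_len_filter]; simp)]
            rw [show ((mid.filter nonsp).reverse ++ [a]).drop (mid.countP nonsp) = [a] by
              rw [countP_eq_len_filter,
                show (mid.filter nonsp).length = (mid.filter nonsp).reverse.length by simp]
              exact List.drop_left]
            simp [fill, hsp]

lemma gd_eq_fill (u : List Char) : gd u = fill u ((u.filter nonsp).reverse) :=
  gd_eq_fill_aux u.length u le_rfl

lemma gd_nil : gd [] = [] := by rw [gd.eq_def]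

lemma gd_singleton (a : Char) : gd [a] = [a] := by rw [gd.eq_def]; simp

lemma gd_cons_space (rest : List Char) (h : rest ≠ []) : gd (' ' :: rest) = ' ' :: gd rest := by
  rw [gd.eq_def]; simp [h]

lemma gd_concat_space (a : Char) (v : List Char) (ha : a ≠ ' ') :
    gd (a :: (v ++ [' '])) = gd (a :: v) ++ [' '] := by
  rw [gd.eq_def]; simp [ha]

lemma gd_concat_swap (a b : Char) (v : List Char) (ha : a ≠ ' ') (hb : b ≠ ' ') :
    gd (a :: (v ++ [b])) = b :: gd v ++ [a] := by
  rw [gd.eq_def]; simp [ha, hb]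

lemma take_succ_getElem (t : List Char) (l : Nat) (hl : l < t.length) :
    t.take (l + 1) = t.take l ++ [t[l]] := by
  rw [List.take_add_one]; simp [List.getElem?_eq_getElem hl]

lemma drop_take_head (t : List Char) (l k : Nat) (hl : l < t.length) :
    (t.drop l).take (k + 1) = t[l] :: (t.drop (l + 1)).take k := by
  rw [List.drop_eq_getElem_cons hl, List.take_succ_cons]

lemma drop_take_last (t : List Char) (l k r : Nat) (hk : l + k = r) (hr : r < t.length) :
    (t.drop l).take (k + 1) = (t.drop l).take k ++ [t[r]] := by
  rw [List.take_add_one]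
  have : (t.drop l)[k]? = some t[r] := by
    rw [List.getElem?_drop, show l + k = r from hk, List.getElem?_eq_getElem hr]
  simp [this]

lemma swapLoop_eq (n : Nat) : ∀ t l r, r - l = n → l ≤ r + 1 → r + 1 ≤ t.length →
    swapLoop t l r = t.take l ++ gd ((t.drop l).take (r + 1 - l)) ++ t.drop (r + 1) := by
  induction n using Nat.strong_induction_on with
  | _ n ih =>
  intro t l r hn hlr hrlen
  rw [swapLoop]
  by_cases h : l < r
  · have hl : l < t.length := by omega
    have hr' : r < t.length := by omega
    rw [dif_pos h, List.getD_eq_getElem t ' ' hl, List.getD_eq_getElem t ' ' hr']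
    have hu : (t.drop l).take (r + 1 - l) = t[l] :: (t.drop (l + 1)).take (r - l) := by
      rw [show r + 1 - l = (r - l) + 1 by omega, drop_take_head t l _ hl]
    have hmidne : (t.drop (l + 1)).take (r - l) ≠ [] := by
      apply List.ne_nil_of_length_pos
      simp [List.length_take, List.length_drop]; omega
    by_cases h1 : t[l] = ' '
    · rw [if_pos h1]
      rw [ih (r - (l + 1)) (by omega) t (l + 1) r rfl (by omega) hrlen]
      rw [hu, h1, gd_cons_space _ hmidne,
        show r + 1 - (l + 1) = r - l by omega,
        take_succ_getElem t l hl, h1]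
      simp [List.append_assoc]
    · rw [if_neg h1]
      by_cases h2 : t[r] = ' '
      · rw [if_pos h2]
        rw [ih (r - 1 - l) (by omega) t l (r - 1) rfl (by omega) (by omega)]
        have hv := drop_take_last t (l + 1) (r - l - 1) r (by omega) hr'
        rw [show r - l - 1 + 1 = r - l by omega] at hv
        rw [hu, hv, h2, gd_concat_space _ _ h1, show r - 1 + 1 = r by omega]
        have hw := drop_take_head t l (r - l - 1) hl
        rw [show r - l - 1 + 1 = r - l by omega] at hw
        rw [hw, List.drop_eq_getElem_cons hr', h2]
        simp [List.append_assoc]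
      · rw [if_neg h2]
        rw [ih (r - 1 - (l + 1)) (by omega) _ (l + 1) (r - 1) rfl (by omega) (by simp; omega)]
        set t' := (t.set l t[r]).set r t[l] with ht'
        have ha : t'.take (l + 1) = t.take l ++ [t[r]] := by
          rw [ht', List.take_set,
            List.set_eq_of_length_le (by simp [List.length_take]; omega),
            List.take_set, take_succ_getElem t l hl, List.set_append]
          simp [List.length_take, Nat.min_eq_left (le_of_lt hl)]
        have hb : (t'.drop (l + 1)).take (r - l - 1) = (t.drop (l + 1)).take (r - l - 1) := by
          rw [ht', List.drop_set, if_neg (by omega), List.drop_set, if_pos (by omega),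
            List.take_set, List.set_eq_of_length_le (by simp [List.length_take, List.length_drop]; omega)]
        have hc : t'.drop r = t[l] :: t.drop (r + 1) := by
          rw [ht', List.drop_set, if_neg (by omega), List.drop_set, if_pos (by omega),
            List.drop_eq_getElem_cons hr']
          rw [Nat.sub_self, List.set_cons_zero]
        have hv := drop_take_last t (l + 1) (r - l - 1) r (by omega) hr'
        rw [show r - l - 1 + 1 = r - l by omega] at hv
        rw [show r - 1 + 1 - (l + 1) = r - l - 1 by omega, show r - 1 + 1 = r by omega,
          ha, hb, hc, hu, hv, gd_concat_swap _ _ _ h1 h2]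
        simp [List.append_assoc]
  · rw [dif_neg h]
    rcases (by omega : l = r ∨ l = r + 1) with rfl | rfl
    · have hl : l < t.length := by omega
      rw [show l + 1 - l = 1 by omega, show (1 : Nat) = 0 + 1 from rfl,
        drop_take_head t l 0 hl]
      simp [gd_singleton]
    · rw [show r + 1 - (r + 1) = 0 by omega]
      simp [gd_nil]

-- ===== VERDICT (by name: the statement is the Claim_ definition above) =====
theorem solve_spec : Claim_equal_solve := by
  intro s _
  unfold Spec_solve
  show solve s = solve_alt s
  unfold solve solve_alt
  simp only [PySem.Str.slice?_none_none_neg_one, Option.getD_some, solveA_go_eq_fill,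
    List.nil_append]
  have hrl : (PySem.Str.replace (String.ofList s.toList.reverse) " " "").toList
      = (s.toList.filter nonsp).reverse := by
    rw [PySem.Str.toList_replace,
      show (String.ofList s.toList.reverse).toList = s.toList.reverse from by simp,
      show (" " : String).toList = [' '] from rfl,
      show ("" : String).toList = [] from rfl,
      replace_space_empty, List.filter_reverse]
  rw [hrl]
  rcases eq_or_ne s.toList [] with he | he
  · rw [he, swapLoop]
    simp [fill]
  · have hlen : 1 ≤ s.toList.length := List.length_pos_of_ne_nil he
    rw [swapLoop_eq (s.toList.length - 1) s.toList 0 (s.toList.length - 1) rfl (by omega)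
      (by omega),
      show s.toList.length - 1 + 1 = s.toList.length by omega]
    simp [gd_eq_fill]
    rw [List.take_of_length_le (by simp), List.drop_eq_nil_of_le (by simp)]
    simp
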